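-- pv_equiv track=rewrite | github.com/gabrielfuenmar/grain_movement | app.py | _elnino_span_labels
-- ===== SOURCE A (Python) =====
-- def _parse_period_parts(label: str):
--     """
--     Returns (year:int, part:int) from a period label that may look like:
--       - YYYY-MM   (e.g., 2024-03)
--       - MM-YYYY   (e.g., 03-2024)
--       - YYYY-WW   (e.g., 2024-12)  # weeks
--     Falls back to (9999, 9999) if it can't parse.
--     """
--     try:
--         a, b = str(label).split("-")
--         # MM-YYYY (month first)
--         if len(a) == 2 and len(b) == 4:
--             return int(b), int(a)
--         # YYYY-MM or YYYY-WW (year first)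
--         if len(a) == 4:
--             return int(a), int(b)
--         # Fallback guess: if b looks like year
--         if len(b) == 4:
--             return int(b), int(a)
--         return 9999, 9999
--     except Exception:
--         return 9999, 9999
--
-- def _elnino_bounds_for_freq(freq: str):
--     # Hovmöller-ish window: Jun 2023 – Apr 2024
--     if freq == "monthly":
--         return (2023, 6), (2024, 4)     # months
--     else:
--         return (2023, 22), (2024, 17)   # ISO weeks (≈ Jun–Apr)
--
-- def _elnino_span_labels(cats: list, freq: str):
--     """Return (x0_label, x1_label) within the CURRENT category list."""
--     (y0, p0), (y1, p1) = _elnino_bounds_for_freq(freq)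
--     idxs = []
--     for i, lab in enumerate(cats):
--         y, p = _parse_period_parts(lab)
--         if y == 9999:
--             continue
--         if (y == 2023 and ((freq == "monthly" and p >= p0) or (freq != "monthly" and p >= p0))) \
--            or (y == 2024 and ((freq == "monthly" and p <= p1) or (freq != "monthly" and p <= p1))):
--             idxs.append(i)
--     if not idxs:
--         return None, None
--     return cats[min(idxs)], cats[max(idxs)]
-- ===== SOURCE B (Python) =====
-- def _parse_period_parts(label: str):
--     try:
--         a, b = str(label).split("-")
--         if len(a) == 2 and len(b) == 4:
--             return int(b), int(a)
--         if len(a) == 4: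
--             return int(a), int(b)
--         if len(b) == 4:
--             return int(b), int(a)
--         return 9999, 9999
--     except Exception:
--         return 9999, 9999
--
-- def _elnino_bounds_for_freq(freq: str):
--     if freq == "monthly":
--         return (2023, 6), (2024, 4)
--     else:
--         return (2023, 22), (2024, 17)
--
-- def _elnino_span_labels(cats: list, freq: str):
--     """Two opposite-direction short-circuit scans instead of collecting indices."""
--     (_y0, p0), (_y1, p1) = _elnino_bounds_for_freq(freq)
--
--     def qualifies(lab):
--         y, p = _parse_period_parts(lab)
--         if y == 9999:
--             return False
--         return (y == 2023 and p >= p0) or (y == 2024 and p <= p1)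
--
--     first = next((lab for lab in cats if qualifies(lab)), None)
--     if first is None:
--         return None, None
--     last = next(lab for lab in reversed(cats) if qualifies(lab))
--     return first, last
-- ===== Notes on version B (the rewrite author's own statement) =====
-- stated objective: simpler
-- what changed: A collects every qualifying index via enumerate into a list and then reduces it with min/max plus two list indexings; B never builds an index list: it short-circuits with a forward scan for the first qualifying label and a backward scan over reversed(cats) for the last.
import Mathlib
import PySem

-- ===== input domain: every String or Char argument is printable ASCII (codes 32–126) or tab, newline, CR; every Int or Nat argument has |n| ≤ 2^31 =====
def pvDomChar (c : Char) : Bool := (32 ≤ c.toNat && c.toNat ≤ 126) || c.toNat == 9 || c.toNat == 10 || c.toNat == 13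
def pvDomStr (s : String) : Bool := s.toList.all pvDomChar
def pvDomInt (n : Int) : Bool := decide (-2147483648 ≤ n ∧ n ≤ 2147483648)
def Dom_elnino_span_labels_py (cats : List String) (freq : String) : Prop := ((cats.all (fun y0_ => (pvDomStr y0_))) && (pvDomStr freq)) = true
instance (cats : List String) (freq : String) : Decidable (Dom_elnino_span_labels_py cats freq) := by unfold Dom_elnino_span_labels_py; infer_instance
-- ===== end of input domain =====

-- B replaces A's collect-all-indices-then-min/max reduction with two opposite-direction
-- short-circuiting scans (find first / find last qualifying label); objective: simpler, same cost.

-- ===== PORT A =====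

-- _parse_period_parts: the try block is rendered by Option matches (none = the caught exception)
def pvParseParts (label : String) : Int × Int :=
  match PySem.Str.split? label "-" with
  | some [a, b] =>
      if PySem.Str.len a == 2 && PySem.Str.len b == 4 then
        match PySem.Int.ofStr? b, PySem.Int.ofStr? a with
        | some y, some p => (y, p)
        | _, _ => (9999, 9999)
      else if PySem.Str.len a == 4 then
        match PySem.Int.ofStr? a, PySem.Int.ofStr? b with
        | some y, some p => (y, p)
        | _, _ => (9999, 9999)
      else if PySem.Str.len b == 4 then
        match PySem.Int.ofStr? b, PySem.Int.ofStr? a with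
        | some y, some p => (y, p)
        | _, _ => (9999, 9999)
      else (9999, 9999)
  | _ => (9999, 9999)

-- _elnino_bounds_for_freq
def pvElninoBounds (freq : String) : (Int × Int) × (Int × Int) :=
  if freq == "monthly" then ((2023, 6), (2024, 4)) else ((2023, 22), (2024, 17))

def elnino_span_labels_py (cats : List String) (freq : String) : Option String × Option String :=
  let b := pvElninoBounds freq
  let p0 := b.1.2
  let p1 := b.2.2
  let idxs : List Int := (PySem.List.enumerate cats).foldl (fun acc il =>
      let yp := pvParseParts il.2
      if yp.1 == 9999 then acc
      else if (yp.1 == 2023 && ((freq == "monthly" && decide (yp.2 ≥ p0)) || (freq != "monthly" && decide (yp.2 ≥ p0))))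
              || (yp.1 == 2024 && ((freq == "monthly" && decide (yp.2 ≤ p1)) || (freq != "monthly" && decide (yp.2 ≤ p1)))) then
        acc ++ [il.1]
      else acc) []
  if idxs.isEmpty then (none, none)
  else ((PySem.List.min? idxs (fun i => i)).bind (fun i => PySem.List.pyGet? cats i),
        (PySem.List.max? idxs (fun i => i)).bind (fun i => PySem.List.pyGet? cats i))

-- ===== PORT B =====

def pvQualifies (freq : String) (lab : String) : Bool :=
  let b := pvElninoBounds freq
  let p0 := b.1.2
  let p1 := b.2.2
  let yp := pvParseParts lab
  if yp.1 == 9999 then false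
  else (yp.1 == 2023 && decide (p0 ≤ yp.2)) || (yp.1 == 2024 && decide (yp.2 ≤ p1))

def elnino_span_labels_py_alt (cats : List String) (freq : String) : Option String × Option String :=
  match cats.find? (pvQualifies freq) with
  | none => (none, none)
  | some first => (some first, cats.reverse.find? (pvQualifies freq))

-- ===== PRECONDITION & SPEC =====
def Spec_elnino_span_labels_py (cats : List String) (freq : String) (out : Option String × Option String) : Prop := out = elnino_span_labels_py_alt cats freq
instance (cats : List String) (freq : String) (out : Option String × Option String) : Decidable (Spec_elnino_span_labels_py cats freq out) := by unfold Spec_elnino_span_labels_py; infer_instance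

-- ===== CLAIM (what is proved, stated in full; the proofs are below) =====
def Claim_equal_elnino_span_labels_py : Prop := ∀ (cats : List String) (freq : String), Dom_elnino_span_labels_py cats freq → Spec_elnino_span_labels_py cats freq (elnino_span_labels_py cats freq)

-- ===== LEMMAS AND PROOFS =====
-- helper definitions and lemmas used only by the proofs
def pvQIdxs (q : String → Bool) : List String → Int → List Int
  | [], _ => []
  | a :: t, n => (if q a then [n] else []) ++ pvQIdxs q t (n + 1)

lemma pvQIdxs_ge (q : String → Bool) (cats : List String) : ∀ (n : Int), ∀ i ∈ pvQIdxs q cats n, n ≤ i := by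
  induction cats with
  | nil => intro n i hi; simp [pvQIdxs] at hi
  | cons a t ih =>
    intro n i hi
    by_cases h : q a = true <;> simp [pvQIdxs, h] at hi
    · rcases hi with rfl | hi
      · exact le_refl _
      · exact le_trans (by omega) (ih (n+1) i hi)
    · exact le_trans (by omega) (ih (n+1) i hi)

lemma pvQIdxs_pairwise (q : String → Bool) (cats : List String) : ∀ (n : Int), (pvQIdxs q cats n).Pairwise (· < ·) := by
  induction cats with
  | nil => intro n; simp [pvQIdxs]
  | cons a t ih =>
    intro n
    by_cases h : q a = true <;> simp [pvQIdxs, h]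
    · exact ⟨fun i hi => lt_of_lt_of_le (by omega) (pvQIdxs_ge q t (n+1) i hi), ih (n+1)⟩
    · exact ih (n+1)

lemma pvQIdxs_nil_iff (q : String → Bool) (cats : List String) : ∀ (n : Int), (pvQIdxs q cats n = [] ↔ cats.filter q = []) := by
  induction cats with
  | nil => intro n; simp [pvQIdxs]
  | cons a t ih =>
    intro n
    by_cases h : q a = true <;> simp [pvQIdxs, h, ih (n+1)]

lemma pvFoldlMin (t : List Int) : ∀ (x : Int), (∀ y ∈ t, x ≤ y) → t.foldl min x = x := by
  induction t with
  | nil => intro x _; rfl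
  | cons y t ih =>
    intro x h
    have hm : min x y = x := min_eq_left (h y (by simp))
    simp only [List.foldl_cons, hm]
    exact ih x (fun z hz => h z (by simp [hz]))

lemma pvFoldlMax (t : List Int) : ∀ (x : Int), (x :: t).Pairwise (· < ·) → t.foldl max x = t.getLastD x := by
  induction t with
  | nil => intro x _; rfl
  | cons y t ih =>
    intro x h
    have hxy : x < y := (List.pairwise_cons.mp h).1 y (by simp)
    have hm : max x y = y := max_eq_right (le_of_lt hxy)
    simp only [List.foldl_cons, hm, List.getLastD_cons]
    exact ih y (List.pairwise_cons.mp h).2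

lemma pvMinSorted (l : List Int) (h : l.Pairwise (· < ·)) : PySem.List.min? l (fun y => y) = l.head? := by
  cases l with
  | nil => exact (PySem.List.min?_eq_none_iff [] _).mpr rfl
  | cons x t =>
    rw [PySem.List.min?_id_cons]
    have hf : t.foldl min x = x :=
      pvFoldlMin t x (fun y hy => le_of_lt ((List.pairwise_cons.mp h).1 y hy))
    simp [hf]

lemma pvMaxSorted (l : List Int) (h : l.Pairwise (· < ·)) : PySem.List.max? l (fun y => y) = l.getLast? := by
  cases l with
  | nil => exact (PySem.List.max?_eq_none_iff [] _).mpr rfl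
  | cons x t =>
    rw [PySem.List.max?_id_cons, pvFoldlMax t x h]
    simp [List.getLast?_cons]

lemma pvGetConsPos (a : String) (t : List String) (i : Int) (h : 1 ≤ i) :
    PySem.List.pyGet? (a :: t) i = PySem.List.pyGet? t (i - 1) := by
  obtain ⟨k, rfl⟩ : ∃ k : Nat, i = ((k : Int) + 1) := ⟨(i - 1).toNat, by omega⟩
  have h1 : ((k : Int) + 1) = ((k + 1 : Nat) : Int) := by push_cast; ring
  rw [h1, show ((k + 1 : Nat) : Int) - 1 = ((k : Nat) : Int) by push_cast; ring,
    PySem.List.pyGet?_natCast, PySem.List.pyGet?_natCast]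
  simp

-- shifting one cons through the "index into the original list" bind
lemma pvBindShift (a : String) (t : List String) (o : Option Int) (n : Int)
    (hge : ∀ j, o = some j → n + 1 ≤ j) :
    o.bind (fun i => PySem.List.pyGet? (a :: t) (i - n)) = o.bind (fun i => PySem.List.pyGet? t (i - (n + 1))) := by
  cases o with
  | none => rfl
  | some j =>
    simp only [Option.bind_some]
    rw [pvGetConsPos a t (j - n) (by have := hge j rfl; omega)]
    congr 1
    omega

lemma pvGetSelfZero (a : String) (t : List String) (n : Int) :
    PySem.List.pyGet? (a :: t) (n - n) = some a := by
  have h0 : (n - n : Int) = ((0 : Nat) : Int) := by omega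
  rw [h0, PySem.List.pyGet?_natCast]
  simp

lemma pvQIdxsHead (q : String → Bool) (cats : List String) :
    ∀ (n : Int), (pvQIdxs q cats n).head?.bind (fun i => PySem.List.pyGet? cats (i - n)) = (cats.filter q).head? := by
  induction cats with
  | nil => intro n; simp [pvQIdxs]
  | cons a t ih =>
    intro n
    by_cases h : q a = true
    · simp only [pvQIdxs, h, ite_true, List.singleton_append, List.head?_cons,
        List.filter_cons_of_pos h, Option.bind_some]
      exact pvGetSelfZero a t n
    · have hfa : q a = false := by simp [h]
      simp only [pvQIdxs, hfa, Bool.false_eq_true, ite_false, List.nil_append,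
        List.filter_cons_of_neg h]
      rw [pvBindShift a t _ n
        (fun j hj => pvQIdxs_ge q t (n+1) j (List.mem_of_mem_head? (Option.mem_def.mpr hj)))]
      exact ih (n+1)

lemma pvQIdxsLast (q : String → Bool) (cats : List String) :
    ∀ (n : Int), (pvQIdxs q cats n).getLast?.bind (fun i => PySem.List.pyGet? cats (i - n)) = (cats.filter q).getLast? := by
  induction cats with
  | nil => intro n; simp [pvQIdxs]
  | cons a t ih =>
    intro n
    by_cases h : q a = true
    · cases hr : pvQIdxs q t (n+1) with
      | nil =>
        have hft : t.filter q = [] := (pvQIdxs_nil_iff q t (n+1)).mp hr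
        simp only [pvQIdxs, h, ite_true, List.singleton_append, hr,
          List.filter_cons_of_pos h, hft, List.getLast?_singleton, Option.bind_some]
        exact pvGetSelfZero a t n
      | cons j rest =>
        have hft : t.filter q ≠ [] := by
          intro hc
          rw [(pvQIdxs_nil_iff q t (n+1)).mpr hc] at hr
          exact List.cons_ne_nil j rest hr.symm
        obtain ⟨b, bs, hfb⟩ : ∃ b bs, t.filter q = b :: bs := by
          cases hfc : t.filter q with
          | nil => exact absurd hfc hft
          | cons b bs => exact ⟨b, bs, rfl⟩
        simp only [pvQIdxs, h, ite_true, List.singleton_append, hr,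
          List.filter_cons_of_pos h, hfb, List.getLast?_cons_cons]
        rw [← hr, pvBindShift a t _ n
          (fun m hm => pvQIdxs_ge q t (n+1) m (List.mem_of_mem_getLast? (Option.mem_def.mpr hm)))]
        have h2 := ih (n+1)
        rw [hfb] at h2
        exact h2
    · have hfa : q a = false := by simp [h]
      simp only [pvQIdxs, hfa, Bool.false_eq_true, ite_false, List.nil_append,
        List.filter_cons_of_neg h]
      rw [pvBindShift a t _ n
        (fun j hj => pvQIdxs_ge q t (n+1) j (List.mem_of_mem_getLast? (Option.mem_def.mpr hj)))]
      exact ih (n+1)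

-- A's loop body tests exactly pvQualifies (the freq == "monthly" case split in A's condition is a tautology)
lemma pvBodyEq (freq : String) (acc : List Int) (il : Int × String) :
    (let yp := pvParseParts il.2;
      if yp.1 == 9999 then acc
      else if (yp.1 == 2023 && ((freq == "monthly" && decide (yp.2 ≥ (pvElninoBounds freq).1.2)) || (freq != "monthly" && decide (yp.2 ≥ (pvElninoBounds freq).1.2))))
              || (yp.1 == 2024 && ((freq == "monthly" && decide (yp.2 ≤ (pvElninoBounds freq).2.2)) || (freq != "monthly" && decide (yp.2 ≤ (pvElninoBounds freq).2.2)))) then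
        acc ++ [il.1]
      else acc)
    = if pvQualifies freq il.2 then acc ++ [il.1] else acc := by
  unfold pvQualifies
  by_cases h9 : (pvParseParts il.2).1 == 9999 <;>
    by_cases hm : freq == "monthly" <;>
      simp [h9, hm, bne, ge_iff_le]

lemma pvFoldlA (freq : String) (cats : List String) : ∀ (n : Int) (acc : List Int),
    (PySem.List.enumerate cats n).foldl (fun acc il =>
      let yp := pvParseParts il.2
      if yp.1 == 9999 then acc
      else if (yp.1 == 2023 && ((freq == "monthly" && decide (yp.2 ≥ (pvElninoBounds freq).1.2)) || (freq != "monthly" && decide (yp.2 ≥ (pvElninoBounds freq).1.2))))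
              || (yp.1 == 2024 && ((freq == "monthly" && decide (yp.2 ≤ (pvElninoBounds freq).2.2)) || (freq != "monthly" && decide (yp.2 ≤ (pvElninoBounds freq).2.2)))) then
        acc ++ [il.1]
      else acc) acc = acc ++ pvQIdxs (pvQualifies freq) cats n := by
  induction cats with
  | nil => intro n acc; simp [pvQIdxs, PySem.List.enumerate_nil]
  | cons a t ih =>
    intro n acc
    rw [PySem.List.enumerate_cons, List.foldl_cons, pvBodyEq freq acc (n, a)]
    by_cases h : pvQualifies freq a = true
    · rw [if_pos h, ih (n+1) (acc ++ [n])]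
      simp [pvQIdxs, h]
    · rw [if_neg h, ih (n+1) acc]
      simp [pvQIdxs, h]

lemma pvAEq (cats : List String) (freq : String) :
    elnino_span_labels_py cats freq = ((cats.filter (pvQualifies freq)).head?, (cats.filter (pvQualifies freq)).getLast?) := by
  unfold elnino_span_labels_py
  simp only [pvFoldlA freq cats 0 [], List.nil_append]
  cases hq : pvQIdxs (pvQualifies freq) cats 0 with
  | nil =>
    have hf : cats.filter (pvQualifies freq) = [] := (pvQIdxs_nil_iff _ cats 0).mp hq
    simp [hf]
  | cons j rest =>
    have hpw : (j :: rest).Pairwise (· < ·) := hq ▸ pvQIdxs_pairwise (pvQualifies freq) cats 0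
    simp only [List.isEmpty_cons, Bool.false_eq_true, ite_false,
      pvMinSorted _ hpw, pvMaxSorted _ hpw]
    have h1 := pvQIdxsHead (pvQualifies freq) cats 0
    have h2 := pvQIdxsLast (pvQualifies freq) cats 0
    rw [hq] at h1 h2
    simp only [sub_zero] at h1 h2
    rw [← h1, ← h2]

lemma pvBEq (cats : List String) (freq : String) :
    elnino_span_labels_py_alt cats freq = ((cats.filter (pvQualifies freq)).head?, (cats.filter (pvQualifies freq)).getLast?) := by
  unfold elnino_span_labels_py_alt
  cases hf : cats.find? (pvQualifies freq) with
  | none =>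
    have h0 : (cats.filter (pvQualifies freq)).head? = none := by rw [List.head?_filter, hf]
    have hnil : cats.filter (pvQualifies freq) = [] := by
      cases hc : cats.filter (pvQualifies freq) with
      | nil => rfl
      | cons b bs => rw [hc] at h0; exact absurd h0 (by simp)
    simp [hnil]
  | some a =>
    have h0 : (cats.filter (pvQualifies freq)).head? = some a := by rw [List.head?_filter, hf]
    have h1 : cats.reverse.find? (pvQualifies freq) = (cats.filter (pvQualifies freq)).getLast? := by
      rw [← List.head?_filter, List.filter_reverse, List.head?_reverse]
    rw [h0, h1]

-- ===== VERDICT (by name: the statement is the Claim_ definition above) =====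
theorem elnino_span_labels_py_spec : Claim_equal_elnino_span_labels_py := by
  intro cats freq _
  unfold Spec_elnino_span_labels_py
  rw [pvAEq, pvBEq]
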